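-- pv_equiv track=rewrite | github.com/gvsteve24/ps_programmers | 신고결과받기.py | solution
-- ===== SOURCE A (Python) =====
-- from collections import defaultdict
--
-- def solution(id_list, report, k):
--     warnings=defaultdict(set)
--     # warnings=dict().fromkeys(id_list,set())
--     answer_dict=dict().fromkeys(id_list,0)
--
--     for warning in report:
--         accuser,accused=warning.split(' ')
--         warnings[accused].add(accuser)
--
--     for accused in warnings:
--         if len(warnings[accused])>=k:
--             for accuser in warnings[accused]:
--                 answer_dict[accuser]+=1
--
--     return list(answer_dict.values())
-- ===== SOURCE B (Python) =====
-- def solution(id_list, report, k):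
--     pairs = {tuple(w.split(' ')) for w in report}
--     charged = {c for _, c in pairs if sum(d == c for _, d in pairs) >= k}
--     return [sum(a == x and c in charged for a, c in pairs)
--             for x in dict.fromkeys(id_list)]
-- ===== Notes on version B (the rewrite author's own statement) =====
-- stated objective: simpler
-- what changed: Replaces A's defaultdict of per-accused accuser-sets plus a nested increment loop over each qualifying set with one deduplicated (accuser, accused) pair set, a charged-accused set, and a direct count per id in a single comprehension.
import Mathlib
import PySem

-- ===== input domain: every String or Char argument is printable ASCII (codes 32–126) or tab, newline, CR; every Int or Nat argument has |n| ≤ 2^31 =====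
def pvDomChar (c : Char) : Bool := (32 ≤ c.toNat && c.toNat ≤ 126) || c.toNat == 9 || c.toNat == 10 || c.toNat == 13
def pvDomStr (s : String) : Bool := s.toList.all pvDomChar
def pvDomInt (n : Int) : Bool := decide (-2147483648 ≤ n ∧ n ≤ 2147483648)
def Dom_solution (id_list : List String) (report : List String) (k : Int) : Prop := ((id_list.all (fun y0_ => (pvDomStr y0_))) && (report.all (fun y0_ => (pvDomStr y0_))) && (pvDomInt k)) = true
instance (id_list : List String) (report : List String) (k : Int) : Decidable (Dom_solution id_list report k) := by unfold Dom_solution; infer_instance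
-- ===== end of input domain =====

-- B replaces A's per-accused accuser-sets and nested increment loop by one deduplicated pair set
-- and direct per-id counting (objective: simpler; no speed claim).

-- shared helper: w.split(' ') (always a plain list for the non-empty separator " ")
def splitSp (w : String) : List String := (PySem.Str.split? w " ").getD []

-- 'accuser, accused = w.split(' ')': exact when the split has exactly two fields (Pre_ guarantees that;
-- Python raises ValueError otherwise, so outside Pre_ the junk pair ("","") is never claimed about)
def parse2 (w : String) : String × String :=
  match splitSp w with
  | [a, c] => (a, c)
  | _ => ("", "")

-- ===== PORT A =====
-- warnings[accused].add(accuser) on the defaultdict(set): Dict.modify with default Set.empty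
def stepW (d : PySem.Dict String (PySem.Set String)) (w : String) : PySem.Dict String (PySem.Set String) :=
  match splitSp w with
  | [accuser, accused] => d.modify accused PySem.Set.empty (fun s => s.add accuser)
  | _ => d   -- non-2-field split: Python raises ValueError here (outside Pre_)

def solution (id_list : List String) (report : List String) (k : Int) : List Int :=
  -- for warning in report: accuser,accused = warning.split(' '); warnings[accused].add(accuser)
  let warnings : PySem.Dict String (PySem.Set String) := report.foldl stepW PySem.Dict.empty
  -- answer_dict = dict().fromkeys(id_list, 0)
  let answer0 : PySem.Dict String Int :=
    id_list.foldl (fun d x => d.insert x 0) PySem.Dict.empty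
  -- for accused in warnings: if len(warnings[accused]) >= k: for accuser in ...: answer_dict[accuser] += 1
  -- (dict iteration = items; answer_dict[accuser] += 1 is Dict.modify, exact since Pre_ puts every accuser among
  --  the keys; the Set's stored order is not Python's hash order but the increments commute, so the dict is exact)
  let answer : PySem.Dict String Int :=
    warnings.items.foldl (fun ans cs =>
      if k ≤ PySem.Set.len cs.2 then
        cs.2.foldl (fun a accuser => a.modify accuser 0 (fun v => v + 1)) ans
      else ans) answer0
  answer.values

-- ===== PORT B =====
def solution_alt (id_list : List String) (report : List String) (k : Int) : List Int :=
  -- pairs = {tuple(w.split(' ')) for w in report}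
  let pairs : PySem.Set (String × String) := PySem.Set.ofList (report.map parse2)
  -- charged = {c for _, c in pairs if sum(d == c for _, d in pairs) >= k}   (the sum of booleans is countP)
  let charged : PySem.Set String :=
    PySem.Set.ofList ((pairs.filter (fun p => k ≤ (pairs.countP (fun q => q.2 == p.2) : Int))).map (fun p => p.2))
  -- [sum(a == x and c in charged for a, c in pairs) for x in dict.fromkeys(id_list)]
  (PySem.List.dedup id_list).map (fun x =>
    ((pairs.filter (fun p => p.1 == x && charged.contains p.2)).length : Int))

-- accusers of c in a pair list, in order
def accOf (L : List (String × String)) (c : String) : List String :=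
  (L.filter (fun q => q.2 == c)).map (fun q => q.1)

-- ===== PRECONDITION & SPEC =====
-- Pre_ is exactly where A returns: every report is "accuser accused" (exactly one space), and an accuser whose
-- accused collects at least k distinct accusers is a registered id.  Outside it A raises ValueError (bad split)
-- or KeyError (unregistered accuser whose accused reaches k distinct accusers).
def Pre_solution (id_list : List String) (report : List String) (k : Int) : Prop :=
  ∀ w ∈ report, (splitSp w).length = 2 ∧
    (k ≤ ((PySem.List.dedup (accOf (report.map parse2) (parse2 w).2)).length : Int) → (parse2 w).1 ∈ id_list)
instance (id_list : List String) (report : List String) (k : Int) : Decidable (Pre_solution id_list report k) := by unfold Pre_solution; infer_instance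
def pvWitness_solution : List String × List String × Int :=
  (["muzi", "frodo", "apeach"], ["muzi frodo", "apeach frodo", "muzi frodo"], 2)

def Spec_solution (id_list : List String) (report : List String) (k : Int) (out : List Int) : Prop := out = solution_alt id_list report k
instance (id_list : List String) (report : List String) (k : Int) (out : List Int) : Decidable (Spec_solution id_list report k out) := by unfold Spec_solution; infer_instance

-- ===== CLAIM (what is proved, stated in full; the proofs are below) =====
def Claim_equal_solution : Prop := ∀ (id_list : List String) (report : List String) (k : Int), Dom_solution id_list report k → Pre_solution id_list report k → Spec_solution id_list report k (solution id_list report k)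

-- ===== LEMMAS AND PROOFS =====

theorem mem_accOf (L : List (String × String)) (c x : String) :
    x ∈ accOf L c ↔ (x, c) ∈ L := by
  simp only [accOf, List.mem_map, List.mem_filter, beq_iff_eq]
  constructor
  · rintro ⟨⟨a, b⟩, ⟨ha, h2⟩, h1⟩; simp at h1 h2; subst h1 h2; exact ha
  · intro h; exact ⟨(x, c), ⟨h, rfl⟩, rfl⟩

theorem length_accOf (L : List (String × String)) (c : String) :
    (accOf L c).length = L.countP (fun q => q.2 == c) := by
  simp [accOf, List.countP_eq_length_filter]

theorem accOf_discard (s : List (String × String)) (p : String × String) (c : String) :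
    accOf (PySem.Set.discard s p) c
      = if p.2 = c then (accOf s c).filter (fun y => !(y == p.1)) else accOf s c := by
  simp only [accOf, PySem.Set.discard, List.filter_filter, List.filter_map]
  split
  · rename_i h
    congr 1
    apply List.filter_congr
    intro a _
    obtain ⟨a1, a2⟩ := a
    obtain ⟨p1, p2⟩ := p
    simp only at h
    by_cases h2 : a2 = c
    · by_cases h1 : a1 = p1 <;>
        simp [h1, h2, h, Function.comp, Prod.ext_iff]
    · have hf : (a2 == c) = false := by simp [h2]
      simp [hf, Function.comp]
  · rename_i h
    congr 1
    apply List.filter_congr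
    intro a _
    obtain ⟨a1, a2⟩ := a
    obtain ⟨p1, p2⟩ := p
    simp only at h
    by_cases h2 : a2 = c
    · simp [h2]
      intro _ hc; exact h hc.symm
    · simp [h2]

-- first-occurrence dedup commutes with restricting to one accused and projecting to the accuser
theorem dedup_accOf (L : List (String × String)) (c : String) :
    PySem.Set.ofList (accOf L c) = accOf (PySem.Set.ofList L) c := by
  induction L with
  | nil => rfl
  | cons p L ih =>
    rw [PySem.Set.ofList_cons]
    by_cases h : p.2 = c
    · have hx : accOf (p :: L) c = p.1 :: accOf L c := by
        simp [accOf, h]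
      have hy : accOf (p :: (PySem.Set.ofList L).discard p) c
          = p.1 :: accOf ((PySem.Set.ofList L).discard p) c := by
        simp [accOf, h]
      rw [hx, PySem.Set.ofList_cons, ih, hy, accOf_discard, if_pos h]
      rfl
    · have hx : accOf (p :: L) c = accOf L c := by
        simp [accOf, h]
      have hy : accOf (p :: (PySem.Set.ofList L).discard p) c
          = accOf ((PySem.Set.ofList L).discard p) c := by
        simp [accOf, h]
      rw [hx, ih, hy, accOf_discard, if_neg h]

-- A's warnings fold, read at one key
theorem warnings_getD (L : List (String × String)) (d : PySem.Dict String (PySem.Set String)) (c : String) :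
    (L.foldl (fun d p => d.modify p.2 PySem.Set.empty (fun s => s.add p.1)) d).getD c PySem.Set.empty
      = (accOf L c).foldl PySem.Set.add (d.getD c PySem.Set.empty) := by
  induction L generalizing d with
  | nil => rfl
  | cons p L ih =>
    simp only [List.foldl_cons, ih, accOf, List.filter_cons]
    by_cases h : p.2 = c
    · simp [h]
    · have hf : (p.2 == c) = false := by simp [h]
      simp [hf, PySem.Dict.getD_modify, Ne.symm h]

theorem update_of_subset {α : Type} [BEq α] [LawfulBEq α] (s : PySem.Set α) (xs : List α)
    (h : ∀ x ∈ xs, x ∈ s) : PySem.Set.update s xs = s := by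
  rw [PySem.Set.update_eq_append_filter]
  have hnil : (PySem.Set.ofList xs).filter (fun y => !s.contains y) = [] := by
    rw [List.filter_eq_nil_iff]
    intro y hy
    have := h y ((PySem.Set.mem_ofList xs y).1 hy)
    simp at *
    exact this
  rw [hnil, List.append_nil]

theorem answer0_getD (id_list : List String) (x : String) :
    (id_list.foldl (fun d y => d.insert y 0) (PySem.Dict.empty : PySem.Dict String Int)).getD x 0 = 0 := by
  have H : ∀ (d : PySem.Dict String Int), d.getD x 0 = 0 →
      (id_list.foldl (fun d y => d.insert y 0) d).getD x 0 = 0 := by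
    induction id_list with
    | nil => intro d h; exact h
    | cons y ys ih =>
      intro d h
      simp only [List.foldl_cons]
      apply ih
      rw [PySem.Dict.getD_insert]
      split <;> simp [h]
  exact H _ (by simp [PySem.Dict.getD_empty])

-- A's outer fold, read at one key
theorem outer_getD (k : Int) (its : List (String × PySem.Set String)) (ans : PySem.Dict String Int) (x : String) :
    ((its.foldl (fun ans cs =>
        if k ≤ PySem.Set.len cs.2 then
          cs.2.foldl (fun a accuser => a.modify accuser 0 (fun v => v + 1)) ans
        else ans) ans).getD x 0)
      = ans.getD x 0 + (its.map (fun cs => if k ≤ PySem.Set.len cs.2 then (cs.2.count x : Int) else 0)).sum := by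
  induction its generalizing ans with
  | nil => simp
  | cons cs its ih =>
    simp only [List.foldl_cons, List.map_cons, List.sum_cons, ih]
    by_cases h : k ≤ PySem.Set.len cs.2
    · rw [if_pos h, if_pos h, PySem.Dict.getD_foldl_modify_add_one]
      ring
    · rw [if_neg h, if_neg h]; ring

-- keys survive A's outer fold when every incremented accuser is already a key
theorem outer_keys (k : Int) (its : List (String × PySem.Set String)) (ans : PySem.Dict String Int)
    (h : ∀ cs ∈ its, k ≤ PySem.Set.len cs.2 → ∀ a ∈ cs.2, a ∈ ans.keys) :
    (its.foldl (fun ans cs =>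
        if k ≤ PySem.Set.len cs.2 then
          cs.2.foldl (fun a accuser => a.modify accuser 0 (fun v => v + 1)) ans
        else ans) ans).keys = ans.keys := by
  induction its generalizing ans with
  | nil => rfl
  | cons cs its ih =>
    simp only [List.foldl_cons]
    have hstep : (if k ≤ PySem.Set.len cs.2 then
          cs.2.foldl (fun a accuser => a.modify accuser 0 (fun v => v + 1)) ans
        else ans).keys = ans.keys := by
      split
      · rename_i hk
        rw [PySem.Dict.keys_foldl_modify]
        exact update_of_subset _ _ (h cs List.mem_cons_self hk)
      · rfl
    rw [ih, hstep]
    intro cs' hcs' hk a ha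
    rw [hstep]
    exact h cs' (List.mem_cons_of_mem _ hcs') hk a ha

-- the sum over distinct accused equals the count over distinct pairs
theorem swap_sum (C : List String) (D : List (String × String)) (x : String)
    (hC : C.Nodup) (hD : D.Nodup) (hmem : ∀ c, c ∈ C ↔ c ∈ D.map Prod.snd) (Q : String → Bool) :
    (C.map (fun c => if (x, c) ∈ D ∧ Q c then (1 : Int) else 0)).sum
      = (D.countP (fun p => p.1 == x && Q p.2) : Int) := by
  have e1 : (C.map (fun c => if (x, c) ∈ D ∧ Q c then (1 : Int) else 0))
      = (C.map (fun c => if (decide ((x, c) ∈ D) && Q c) = true then (1 : Int) else 0)) := by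
    apply List.map_congr_left
    intro c _
    by_cases h : (x, c) ∈ D ∧ Q c
    · rw [if_pos h, if_pos (by simp [h.1, h.2])]
    · rw [if_neg h, if_neg (by simpa using h)]
  rw [e1, PySem.List.sum_map_ite_one_zero]
  congr 1
  rw [List.countP_eq_length_filter, List.countP_eq_length_filter]
  have hCf := hC.filter (p := fun c => decide ((x, c) ∈ D) && Q c)
  have hDf := hD.filter (p := fun p => p.1 == x && Q p.2)
  rw [← List.toFinset_card_of_nodup hCf, ← List.toFinset_card_of_nodup hDf]
  apply Finset.card_bij (fun c _ => (x, c))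
  · intro c hc
    simp only [List.mem_toFinset, List.mem_filter] at *
    obtain ⟨-, hp⟩ := hc
    simp only [Bool.and_eq_true, decide_eq_true_eq] at hp
    exact ⟨hp.1, by simp [hp.2]⟩
  · intro a ha b hb hab
    simpa using congrArg Prod.snd hab
  · intro p hp
    simp only [List.mem_toFinset, List.mem_filter, Bool.and_eq_true, beq_iff_eq,
      decide_eq_true_eq] at hp ⊢
    obtain ⟨hpD, hpx, hpQ⟩ := hp
    refine ⟨p.2, ⟨⟨?_, ?_, hpQ⟩, ?_⟩⟩
    · exact (hmem p.2).2 (List.mem_map_of_mem hpD)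
    · rw [← hpx]; exact hpD
    · rw [← hpx]

theorem main_eq (id_list : List String) (report : List String) (k : Int)
    (hpre : Pre_solution id_list report k) :
    solution id_list report k = solution_alt id_list report k := by

  -- abbreviations
  have hpairs : ∀ w ∈ report, splitSp w = [(parse2 w).1, (parse2 w).2] := by
    intro w hw
    obtain ⟨hlen, -⟩ := hpre w hw
    rcases hl : splitSp w with _ | ⟨a, _ | ⟨c, _ | ⟨e, rest⟩⟩⟩ <;>
      rw [hl] at hlen <;> simp at hlen
    simp [parse2, hl]
  -- A's first loop over report is the same fold over the parsed pairs
  have hW : report.foldl stepW PySem.Dict.empty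
      = (report.map parse2).foldl
          (fun d p => d.modify p.2 PySem.Set.empty (fun s => s.add p.1)) PySem.Dict.empty := by
    rw [List.foldl_map]
    apply PySem.List.foldl_congr_mem
    intro acc w hw
    rw [stepW, hpairs w hw]
  have hsol : solution id_list report k
      = ((report.foldl stepW PySem.Dict.empty).items.foldl (fun ans cs =>
          if k ≤ PySem.Set.len cs.2 then
            cs.2.foldl (fun a accuser => a.modify accuser 0 (fun v => v + 1)) ans
          else ans) (id_list.foldl (fun d x => d.insert x 0) PySem.Dict.empty)).values := rfl
  rw [hsol, hW]
  set L := report.map parse2 with hL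
  set D := PySem.Set.ofList L with hD
  set C := PySem.Set.ofList (L.map Prod.snd) with hCdef
  set W := L.foldl (fun d p => d.modify p.2 PySem.Set.empty (fun s => s.add p.1)) PySem.Dict.empty with hWdef
  have hWget : ∀ c, W.getD c PySem.Set.empty = PySem.Set.ofList (accOf L c) := by
    intro c
    rw [hWdef, warnings_getD, PySem.Dict.getD_empty, PySem.Set.ofList_eq_foldl]
    try rfl
  have hWkeys : W.keys = C := by
    have h1 : W.keys = PySem.Set.update (PySem.Dict.empty : PySem.Dict String (PySem.Set String)).keys
        (L.map (fun p => p.2)) :=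
      PySem.Dict.keys_foldl_modify_key L (fun p => p.2) PySem.Set.empty (fun _ p => fun s => s.add p.1) PySem.Dict.empty
    rw [h1, PySem.Dict.keys_empty, PySem.Set.update_nil_left]
    try rfl
  have hWnodup : W.keys.Nodup := by rw [hWkeys]; exact PySem.Set.nodup_ofList _
  have hWitems : W.items = C.map (fun c => (c, PySem.Set.ofList (accOf L c))) := by
    rw [PySem.Dict.items_eq_map_keys W hWnodup PySem.Set.empty, hWkeys]
    apply List.map_congr_left
    intro c _
    rw [hWget]
  set A0 := id_list.foldl (fun d x => d.insert x 0) (PySem.Dict.empty : PySem.Dict String Int) with hA0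
  have hA0keys : A0.keys = PySem.Set.ofList id_list := by
    have h1 : A0.keys = PySem.Set.update (PySem.Dict.empty : PySem.Dict String Int).keys id_list :=
      PySem.Dict.keys_foldl_insert id_list (fun _ _ => 0) PySem.Dict.empty
    rw [h1, PySem.Dict.keys_empty, PySem.Set.update_nil_left]
  -- every accuser in warnings is a key of answer_dict
  have hacc : ∀ cs ∈ W.items, k ≤ PySem.Set.len cs.2 → ∀ a ∈ cs.2, a ∈ A0.keys := by
    rw [hWitems]
    intro cs hcs hk a ha
    obtain ⟨c, -, rfl⟩ := List.mem_map.1 hcs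
    have h1 : a ∈ accOf L c := (PySem.Set.mem_ofList _ _).1 ha
    have h2 : (a, c) ∈ L := (mem_accOf L c a).1 h1
    obtain ⟨w, hw, hwp⟩ := List.mem_map.1 h2
    have hpre2 := (hpre w hw).2
    rw [hwp] at hpre2
    have := hpre2 (by
      rw [PySem.List.dedup_eq_ofList]
      simpa [PySem.Set.len, ← hL] using hk)
    rw [hA0keys]
    exact (PySem.Set.mem_ofList _ _).2 this
  set A1 := W.items.foldl (fun ans cs =>
      if k ≤ PySem.Set.len cs.2 then
        cs.2.foldl (fun a accuser => a.modify accuser 0 (fun v => v + 1)) ans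
      else ans) A0 with hA1
  have hA1keys : A1.keys = A0.keys := outer_keys k W.items A0 hacc
  have hA1nodup : A1.keys.Nodup := by
    rw [hA1keys, hA0keys]; exact PySem.Set.nodup_ofList _
  -- both sides as a map over the deduplicated id list
  show A1.values = _
  rw [PySem.Dict.values_eq_map_keys A1 hA1nodup 0, hA1keys, hA0keys]
  unfold solution_alt
  rw [PySem.List.dedup_eq_ofList]
  simp only [← hL, ← hD]
  apply List.map_congr_left
  intro x _
  -- A's value at x
  rw [hA1, outer_getD, answer0_getD, hWitems, List.map_map]
  have hterm : ∀ c ∈ C,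
      ((fun cs => if k ≤ PySem.Set.len cs.2 then ((cs.2.count x : Nat) : Int) else 0) ∘
        fun c => (c, PySem.Set.ofList (accOf L c))) c
      = (fun c => if (x, c) ∈ D ∧ (decide (k ≤ ((D.countP fun q => q.2 == c : Nat) : Int))) then (1 : Int) else 0) c := by
    intro c _
    simp only [Function.comp]
    have hS : PySem.Set.ofList (accOf L c) = accOf D c := by rw [dedup_accOf, hD]
    have hlen2 : PySem.Set.len (PySem.Set.ofList (accOf L c)) = ((D.countP fun q => q.2 == c : Nat) : Int) := by
      rw [hS]; simp [PySem.Set.len, length_accOf]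
    have hmemS : x ∈ PySem.Set.ofList (accOf L c) ↔ (x, c) ∈ D := by
      rw [hS]; exact mem_accOf D c x
    have hcount : ((PySem.Set.ofList (accOf L c)).count x : Int) = if (x, c) ∈ D then (1 : Int) else 0 := by
      by_cases hm : (x, c) ∈ D
      · rw [if_pos hm, List.count_eq_one_of_mem (PySem.Set.nodup_ofList _) (hmemS.2 hm)]
        rfl
      · rw [if_neg hm, List.count_eq_zero_of_not_mem (fun hmm => hm (hmemS.1 hmm))]
        rfl
    rw [hlen2, hcount]
    by_cases h1 : k ≤ ((D.countP fun q => q.2 == c : Nat) : Int)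
    · rw [if_pos h1]
      by_cases h2 : (x, c) ∈ D
      · rw [if_pos h2, if_pos ⟨h2, by simp [h1]⟩]
      · rw [if_neg h2, if_neg (by simp [h2])]
    · rw [if_neg h1, if_neg (by simp [h1])]
  rw [List.map_congr_left hterm, zero_add]
  rw [swap_sum C D x (PySem.Set.nodup_ofList _) (PySem.Set.nodup_ofList _)
      (by intro c; rw [hCdef, PySem.Set.mem_ofList]
          constructor
          · intro hc
            obtain ⟨p, hp, rfl⟩ := List.mem_map.1 hc
            exact List.mem_map_of_mem ((PySem.Set.mem_ofList _ _).2 hp)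
          · intro hc
            obtain ⟨p, hp, rfl⟩ := List.mem_map.1 hc
            exact List.mem_map_of_mem ((PySem.Set.mem_ofList _ _).1 hp))
      (fun c => decide (k ≤ ((D.countP fun q => q.2 == c : Nat) : Int)))]
  -- B's value at x
  rw [List.countP_eq_length_filter]
  congr 1
  refine congrArg List.length (List.filter_congr ?_)
  intro p hp
  -- charged membership agrees with the count test for p ∈ D
  have : (PySem.Set.ofList
        ((D.filter (fun p => k ≤ ((D.countP fun q => q.2 == p.2 : Nat) : Int))).map (fun p => p.2))).contains p.2
      = decide (k ≤ ((D.countP fun q => q.2 == p.2 : Nat) : Int)) := by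
    by_cases hq : k ≤ ((D.countP fun q => q.2 == p.2 : Nat) : Int)
    · have : p ∈ D.filter (fun p => decide (k ≤ ((D.countP fun q => q.2 == p.2 : Nat) : Int))) := by
        rw [List.mem_filter]; exact ⟨hp, by simp [hq]⟩
      simp only [decide_eq_true hq]
      have hc : (PySem.Set.ofList
          ((D.filter (fun p => k ≤ ((D.countP fun q => q.2 == p.2 : Nat) : Int))).map (fun p => p.2))).contains p.2 = true := by
        rw [PySem.Set.contains_eq_listContains]
        simp only [List.contains_iff_mem]  -- ?
        rw [PySem.Set.mem_ofList]
        exact List.mem_map_of_mem this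
      rw [hc]
    · simp only [decide_eq_false hq]
      rw [PySem.Set.contains_eq_listContains]
      rw [Bool.eq_false_iff]
      intro hc
      rw [List.contains_iff_mem, PySem.Set.mem_ofList] at hc  -- ?
      obtain ⟨q, hqf, hq2⟩ := List.mem_map.1 hc
      rw [List.mem_filter] at hqf
      apply hq
      have := hqf.2
      simp only [decide_eq_true_eq] at this
      have hcp : (D.countP fun r => r.2 == q.2) = (D.countP fun r => r.2 == p.2) := by
        apply List.countP_congr
        intro r _
        rw [hq2]
      rw [hcp] at this
      exact this
  rw [this]


-- ===== VERDICT (by name: the statement is the Claim_ definition above) =====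
theorem solution_spec : Claim_equal_solution := by
  intro id_list report k _ hpre
  unfold Spec_solution
  exact main_eq id_list report k hpre
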